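-- pv_equiv track=rewrite | github.com/YasinRoshdy/YasinRoshdy | base/general/logic/logic.py | youtube_url
-- ===== SOURCE A (Python) =====
-- def to_url(url):
--     if not url:
--         return url
--     pref = "https://www.youtube.com/watch?v="
--     if pref not in url:
--         return pref + url
--
--     return url
--
-- def youtube_url(url: str):
--     if not url:
--         return None
--     if "watch?v=" in url:
--         return url.replace("watch?v=", "embed/")
--     elif "embed/" in url:
--         return url
--
--     else:
--         return youtube_url(to_url(url))
-- ===== SOURCE B (Python) =====
-- def youtube_url(url: str):
--     if not url:
--         return None
--     if "watch?v=" in url: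
--         return url.replace("watch?v=", "embed/")
--     if "embed/" in url:
--         return url
--     return "https://www.youtube.com/embed/" + url
-- ===== Notes on version B (the rewrite author's own statement) =====
-- stated objective: simpler
-- what changed: Replaces A's recursive round-trip (to_url helper prepends the watch prefix, then a recursive call re-scans and replaces it) with a flat four-branch function that appends the embed prefix directly; no helper, no recursion, no second substring scan.
import Mathlib
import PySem

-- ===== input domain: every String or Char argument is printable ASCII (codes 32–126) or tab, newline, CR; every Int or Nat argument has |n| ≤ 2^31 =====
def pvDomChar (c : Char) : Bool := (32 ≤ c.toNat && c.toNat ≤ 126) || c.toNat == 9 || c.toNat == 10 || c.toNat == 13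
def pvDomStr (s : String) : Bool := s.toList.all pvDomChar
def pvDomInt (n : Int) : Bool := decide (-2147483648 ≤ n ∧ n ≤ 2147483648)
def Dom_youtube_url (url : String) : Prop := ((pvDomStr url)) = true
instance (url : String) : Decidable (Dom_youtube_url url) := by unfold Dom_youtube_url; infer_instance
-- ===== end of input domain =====

-- B flattens A's to_url-helper + single-level recursion into one non-recursive four-branch
-- function that builds the embed URL directly (objective: simpler).

-- ===== PORT A =====
-- str concatenation 'pref + url' is ported exactly as String.ofList of the concatenated code points
def pvToUrl (url : String) : String :=
  if url = "" then url
  else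
    if PySem.Str.isIn "https://www.youtube.com/watch?v=" url = false then
      String.ofList ("https://www.youtube.com/watch?v=".toList ++ url.toList)
    else url

-- A's recursion ported with a fuel guard only to make it total; fuel 2 always suffices because the
-- recursive call's argument contains "watch?v=" and so returns without recursing again.
def pvYoutubeGo : Nat → String → Option String
  | 0, _ => none
  | fuel+1, url =>
    if url = "" then none
    else if PySem.Str.isIn "watch?v=" url then some (PySem.Str.replace url "watch?v=" "embed/")
    else if PySem.Str.isIn "embed/" url then some url
    else pvYoutubeGo fuel (pvToUrl url)

def youtube_url (url : String) : Option String := pvYoutubeGo 2 url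

-- ===== PORT B =====
def youtube_url_alt (url : String) : Option String :=
  if url = "" then none
  else if PySem.Str.isIn "watch?v=" url then some (PySem.Str.replace url "watch?v=" "embed/")
  else if PySem.Str.isIn "embed/" url then some url
  else some (String.ofList ("https://www.youtube.com/embed/".toList ++ url.toList))

-- ===== PRECONDITION & SPEC =====
def Spec_youtube_url (url : String) (out : Option String) : Prop := out = youtube_url_alt url
instance (url : String) (out : Option String) : Decidable (Spec_youtube_url url out) := by unfold Spec_youtube_url; infer_instance

-- ===== CLAIM (what is proved, stated in full; the proofs are below) =====
def Claim_equal_youtube_url : Prop := ∀ (url : String), Dom_youtube_url url → Spec_youtube_url url (youtube_url url)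

-- ===== LEMMAS AND PROOFS =====

-- one unfolding step of A's ported recursion
theorem pvYoutubeGo_succ (n : Nat) (u : String) :
    pvYoutubeGo (n+1) u =
      if u = "" then none
      else if PySem.Str.isIn "watch?v=" u then some (PySem.Str.replace u "watch?v=" "embed/")
      else if PySem.Str.isIn "embed/" u then some u
      else pvYoutubeGo n (pvToUrl u) := rfl

-- replace.go on a list with no occurrence of `old` returns acc.reverse ++ l (any fuel)
theorem pvGoNoOccur (old new : List Char) :
    ∀ (fuel : Nat) (l acc : List Char), ¬ old <:+: l →
      PySem.Chars.replace.go old new fuel l acc = acc.reverse ++ l := by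
  intro fuel
  induction fuel with
  | zero => intro l acc _; simp [PySem.Chars.replace.go]
  | succ n ih =>
    intro l acc h
    cases l with
    | nil => simp [PySem.Chars.replace.go]
    | cons c t =>
      have hp : old.isPrefixOf (c :: t) = false := by
        by_contra hp
        exact h (List.IsPrefix.isInfix (by simpa using (Bool.not_eq_false _).mp hp))
      rw [show PySem.Chars.replace.go old new (n+1) (c :: t) acc
            = PySem.Chars.replace.go old new n t (c :: acc) by
          simp [PySem.Chars.replace.go, hp]]
      rw [ih t (c :: acc) (fun hi => h (hi.trans (List.suffix_cons c t).isInfix))]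
      simp

-- replace.go skips an occurrence-free block a, moving it into the accumulator
theorem pvGoSkip (old new : List Char) :
    ∀ (a r acc : List Char),
      (∀ i, i < a.length → ¬ old <+: (a.drop i ++ r)) →
      PySem.Chars.replace.go old new (a ++ r).length (a ++ r) acc
        = PySem.Chars.replace.go old new r.length r (a.reverse ++ acc) := by
  intro a
  induction a with
  | nil => intro r acc _; simp
  | cons c t ih =>
    intro r acc h
    have h0 : ¬ old <+: (c :: (t ++ r)) := by simpa using h 0 (by simp)
    have hp : old.isPrefixOf (c :: (t ++ r)) = false := by
      by_contra hp
      exact h0 (by simpa using (Bool.not_eq_false _).mp hp)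
    simp only [List.cons_append, List.length_cons]
    rw [show PySem.Chars.replace.go old new ((t ++ r).length + 1) (c :: (t ++ r)) acc
          = PySem.Chars.replace.go old new (t ++ r).length (t ++ r) (c :: acc) by
        simp [PySem.Chars.replace.go, hp]]
    rw [ih r (c :: acc) (fun i hi => by simpa using h (i+1) (by simpa using hi))]
    simp

-- the match step of replace.go
theorem pvGoMatch (old new : List Char) (n : Nat) (c : Char) (t acc : List Char)
    (h : old.isPrefixOf (c :: t) = true) :
    PySem.Chars.replace.go old new (n+1) (c :: t) acc
      = PySem.Chars.replace.go old new n ((c :: t).drop old.length) (new.reverse ++ acc) := by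
  simp [PySem.Chars.replace.go, h]

-- no occurrence of "watch?v=" starts inside the first 24 characters of the watch prefix
theorem pvNoEarlyOccur (cs : List Char) :
    ∀ i, i < ("https://www.youtube.com/".toList).length →
      ¬ ("watch?v=".toList <+: ("https://www.youtube.com/".toList.drop i ++ ("watch?v=".toList ++ cs))) := by
  intro i hi hp
  have hlen : ("watch?v=".toList).length ≤ ("https://www.youtube.com/".toList.drop i ++ "watch?v=".toList).length := by
    have h8 : ("watch?v=".toList).length = 8 := by decide
    have h24 : ("https://www.youtube.com/".toList).length = 24 := by decide
    rw [List.length_append, List.length_drop, h8, h24]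
    rw [h24] at hi
    omega
  have hface := List.prefix_iff_eq_take.mp hp
  rw [show ("https://www.youtube.com/".toList.drop i ++ ("watch?v=".toList ++ cs))
        = ("https://www.youtube.com/".toList.drop i ++ "watch?v=".toList) ++ cs by simp,
      List.take_append_of_le_length hlen] at hface
  have key : ∀ j, j < ("https://www.youtube.com/".toList).length →
      "watch?v=".toList ≠ List.take ("watch?v=".toList).length
        ("https://www.youtube.com/".toList.drop j ++ "watch?v=".toList) := by decide
  exact key i hi hface

-- the key fact: replacing in (watch-prefix ++ cs) with no occurrence in cs yields embed-prefix ++ cs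
theorem pvReplaceKey (cs : List Char) (h : ¬ ("watch?v=".toList <:+: cs)) :
    PySem.Chars.replace ("https://www.youtube.com/watch?v=".toList ++ cs) "watch?v=".toList "embed/".toList
      = "https://www.youtube.com/embed/".toList ++ cs := by
  have hsplit : "https://www.youtube.com/watch?v=".toList ++ cs
      = "https://www.youtube.com/".toList ++ ("watch?v=".toList ++ cs) := rfl
  rw [PySem.Chars.replace, if_neg (by decide), hsplit,
      pvGoSkip _ _ _ _ _ (pvNoEarlyOccur cs)]
  have h8 : ("watch?v=".toList).length = 8 := by decide
  have hlen : ("watch?v=".toList ++ cs).length = cs.length + 7 + 1 := by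
    rw [List.length_append, h8]; omega
  rw [hlen]
  rw [show ("watch?v=".toList ++ cs) = 'w' :: ("atch?v=".toList ++ cs) from rfl]
  rw [pvGoMatch _ _ _ _ _ _ (by
    rw [show ('w' :: ("atch?v=".toList ++ cs)) = "watch?v=".toList ++ cs from rfl]
    exact List.isPrefixOf_iff_prefix.mpr (List.prefix_append _ _))]
  rw [show ('w' :: ("atch?v=".toList ++ cs)).drop ("watch?v=".toList).length = cs by
    rw [show ('w' :: ("atch?v=".toList ++ cs)) = "watch?v=".toList ++ cs from rfl, h8]
    simp]
  rw [pvGoNoOccur _ _ _ _ _ h]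
  simp

-- lifted to strings
theorem pvReplaceStr (url : String) (h : PySem.Str.isIn "watch?v=" url = false) :
    PySem.Str.replace (String.ofList ("https://www.youtube.com/watch?v=".toList ++ url.toList)) "watch?v=" "embed/"
      = String.ofList ("https://www.youtube.com/embed/".toList ++ url.toList) := by
  apply String.toList_inj.mp
  rw [PySem.Str.toList_replace]
  simp only [String.toList_ofList]
  exact pvReplaceKey url.toList (fun hi => by
    have := (PySem.Str.isIn_iff_infix "watch?v=" url).mpr hi
    rw [h] at this; exact Bool.noConfusion this)

-- ===== VERDICT (by name: the statement is the Claim_ definition above) =====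
theorem youtube_url_spec : Claim_equal_youtube_url := by
  intro url _
  unfold Spec_youtube_url youtube_url youtube_url_alt
  rw [show (2 : Nat) = 1 + 1 from rfl, pvYoutubeGo_succ]
  by_cases h0 : url = ""
  · simp [h0]
  by_cases h1 : PySem.Str.isIn "watch?v=" url = true
  · rw [h1]; simp [h0]
  by_cases h2 : PySem.Str.isIn "embed/" url = true
  · rw [(by simpa using h1 : PySem.Str.isIn "watch?v=" url = false), h2]; simp [h0]
  · have h1f : PySem.Str.isIn "watch?v=" url = false := by simpa using h1
    have h2f : PySem.Str.isIn "embed/" url = false := by simpa using h2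
    have hpref : PySem.Str.isIn "https://www.youtube.com/watch?v=" url = false := by
      by_contra hp
      have hinf := (PySem.Str.isIn_iff_infix _ url).mp ((Bool.not_eq_false _).mp hp)
      have hw : "watch?v=".toList <:+: "https://www.youtube.com/watch?v=".toList := by decide
      exact h1 ((PySem.Str.isIn_iff_infix _ url).mpr (hw.trans hinf))
    have hto : pvToUrl url = String.ofList ("https://www.youtube.com/watch?v=".toList ++ url.toList) := by
      unfold pvToUrl
      rw [if_neg h0, if_pos hpref]
    have hne : String.ofList ("https://www.youtube.com/watch?v=".toList ++ url.toList) ≠ "" := by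
      intro he
      have := congrArg String.toList he
      simp at this
    have hwin : PySem.Str.isIn "watch?v="
        (String.ofList ("https://www.youtube.com/watch?v=".toList ++ url.toList)) = true := by
      rw [PySem.Str.isIn_iff_infix]
      simp only [String.toList_ofList]
      have hw : "watch?v=".toList <:+: "https://www.youtube.com/watch?v=".toList := by decide
      exact hw.trans (List.prefix_append _ _).isInfix
    rw [if_neg h0, h1f, h2f]
    simp only [Bool.false_eq_true, if_false]
    rw [pvYoutubeGo_succ, hto, if_neg hne, hwin]
    simp only [if_true]
    rw [pvReplaceStr url h1f, if_neg h0]
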